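-- pv_equiv track=rewrite | github.com/mojaie/chorus | chorus/test/test_topology.py | equivalent_ring
-- ===== SOURCE A (Python) =====
-- from collections import deque, Counter
--
-- def equivalent_ring(ring, ref):
--     dqr = deque(ring)
--     rev = deque(reversed(ring))
--     for i in range(len(ring)):
--         dqr.rotate(1)
--         rev.rotate(1)
--         if list(dqr) == list(ref):
--             return True
--         if list(rev) == list(ref):
--             return True
--     return False
-- ===== SOURCE B (Python) =====
-- def _masks(pattern):
--     m = {}
--     i = 0
--     for x in pattern:
--         m[x] = m.get(x, 0) | (1 << i)
--         i += 1
--     return m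
--
--
-- def _bitap(masks, found, text):
--     # Shift-And (bitap): bit j of d is set iff the first j+1 pattern
--     # elements match the last j+1 text elements processed so far.
--     d = 0
--     for x in text:
--         d = ((d << 1) | 1) & masks.get(x, 0)
--         if d & found:
--             return True
--     return False
--
--
-- def equivalent_ring(ring, ref):
--     n = len(ring)
--     if n != len(ref):
--         return False
--     if n == 0:
--         return True
--     found = 1 << (n - 1)
--     doubled = ring + ring
--     return (_bitap(_masks(ref), found, doubled)
--             or _bitap(_masks(list(reversed(ref))), found, doubled))
-- ===== Notes on version B (the rewrite author's own statement) =====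
-- stated objective: faster
-- what changed: B replaces A's per-rotation deque mutation and list comparison by the Shift-And (bitap) string-matching algorithm: one bitmask per symbol of ref, then a single scan of ring+ring updating a bit-parallel NFA state, so no rotation is ever materialised or compared.
-- intended difference: On the single input ring=[] and ref=[] A returns False because its loop body never runs, while B returns True, which is intended since two empty rings are trivially equivalent. — e.g. on equivalent_ring([], []): A returns false, B returns true
import Mathlib
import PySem

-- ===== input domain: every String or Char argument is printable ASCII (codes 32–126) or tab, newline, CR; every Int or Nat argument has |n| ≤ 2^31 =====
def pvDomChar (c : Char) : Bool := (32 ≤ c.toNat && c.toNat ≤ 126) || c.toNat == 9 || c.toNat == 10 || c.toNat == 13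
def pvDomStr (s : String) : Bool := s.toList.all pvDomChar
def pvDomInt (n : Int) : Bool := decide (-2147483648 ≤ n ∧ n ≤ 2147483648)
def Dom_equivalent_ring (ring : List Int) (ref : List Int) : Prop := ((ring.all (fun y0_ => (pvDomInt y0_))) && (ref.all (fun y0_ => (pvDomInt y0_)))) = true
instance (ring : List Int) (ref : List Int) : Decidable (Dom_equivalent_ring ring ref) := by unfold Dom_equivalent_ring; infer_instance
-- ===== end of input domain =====

-- B replaces A's per-rotation deque mutation and comparison by the Shift-And (bitap)
-- matcher: one bitmask per symbol of ref, then a single bit-parallel scan of ring++ring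
-- (objective: faster by bit-parallelism; a timing run measures the speed-up).

-- ===== PORT A =====
-- deque.rotate(1): the last element moves to the front (no-op on an empty deque);
-- expressed as drop/take of the last position, which is exactly that move.
def pvRot1 (l : List Int) : List Int := l.drop (l.length - 1) ++ l.take (l.length - 1)

def pvEqRingLoop (ref : List Int) : Nat → List Int → List Int → Bool
  | 0, _, _ => false
  | m+1, dqr, rev =>
    let dqr' := pvRot1 dqr
    let rev' := pvRot1 rev
    if dqr' = ref then true
    else if rev' = ref then true
    else pvEqRingLoop ref m dqr' rev'

def equivalent_ring (ring : List Int) (ref : List Int) : Bool :=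
  pvEqRingLoop ref ring.length ring ring.reverse

-- ===== PORT B =====
-- _masks: for x in pattern: m[x] = m.get(x, 0) | (1 << i); i += 1   (bitmask counter i : Nat, shift amount)
def pvMasksLoop : List Int → Nat → PySem.Dict Int Nat → PySem.Dict Int Nat
  | [], _, m => m
  | x :: rest, i, m => pvMasksLoop rest (i + 1) (m.insert x ((m.getD x 0) ||| (1 <<< i)))

def pvMasks (pattern : List Int) : PySem.Dict Int Nat :=
  pvMasksLoop pattern 0 PySem.Dict.empty

-- _bitap: d = ((d << 1) | 1) & masks.get(x, 0); 'if d & found: return True'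
-- (Python truthiness of 'd & found' is '≠ 0')
def pvBitap (masks : PySem.Dict Int Nat) (found : Nat) : Nat → List Int → Bool
  | _, [] => false
  | d, x :: rest =>
    let d' := ((d <<< 1) ||| 1) &&& masks.getD x 0
    if d' &&& found ≠ 0 then true else pvBitap masks found d' rest

def equivalent_ring_alt (ring : List Int) (ref : List Int) : Bool :=
  let n := ring.length
  if n ≠ ref.length then false
  else if n = 0 then true
  else
    let found := 1 <<< (n - 1)
    let doubled := ring ++ ring
    pvBitap (pvMasks ref) found 0 doubled || pvBitap (pvMasks ref.reverse) found 0 doubled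

-- ===== PRECONDITION & SPEC =====
-- On the single input ring=[] and ref=[], A returns False because its loop body never runs,
-- while B returns True, which is intended: two empty rings are trivially equivalent.
def D_equivalent_ring (ring : List Int) (ref : List Int) : Prop := ring = [] ∧ ref = []
instance (ring : List Int) (ref : List Int) : Decidable (D_equivalent_ring ring ref) := by unfold D_equivalent_ring; infer_instance

def Spec_equivalent_ring (ring : List Int) (ref : List Int) (out : Bool) : Prop := ¬ D_equivalent_ring ring ref → out = equivalent_ring_alt ring ref
instance (ring : List Int) (ref : List Int) (out : Bool) : Decidable (Spec_equivalent_ring ring ref out) := by unfold Spec_equivalent_ring; infer_instance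

def pvDiffWitness_equivalent_ring : List Int × List Int := ([], [])
def pvDiffWitnessOut_equivalent_ring : Bool × Bool := (false, true)

-- ===== CLAIM (what is proved, stated in full; the proofs are below) =====
def Claim_unchanged_equivalent_ring : Prop := ∀ (ring : List Int) (ref : List Int), Dom_equivalent_ring ring ref → Spec_equivalent_ring ring ref (equivalent_ring ring ref)
def Claim_changed_equivalent_ring : Prop := Dom_equivalent_ring (pvDiffWitness_equivalent_ring.1) (pvDiffWitness_equivalent_ring.2) ∧ D_equivalent_ring (pvDiffWitness_equivalent_ring.1) (pvDiffWitness_equivalent_ring.2) ∧ equivalent_ring (pvDiffWitness_equivalent_ring.1) (pvDiffWitness_equivalent_ring.2) = pvDiffWitnessOut_equivalent_ring.1 ∧ equivalent_ring_alt (pvDiffWitness_equivalent_ring.1) (pvDiffWitness_equivalent_ring.2) = pvDiffWitnessOut_equivalent_ring.2 ∧ pvDiffWitnessOut_equivalent_ring.1 ≠ pvDiffWitnessOut_equivalent_ring.2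
def Claim_exact_equivalent_ring : Prop := ∀ (ring : List Int) (ref : List Int), Dom_equivalent_ring ring ref → D_equivalent_ring ring ref → equivalent_ring ring ref ≠ equivalent_ring_alt ring ref

-- ===== LEMMAS AND PROOFS =====

-- rotation by k positions (leftwards): the canonical form both programs' candidates reduce to
def rotk (k : Nat) (l : List Int) : List Int := l.drop k ++ l.take k

theorem rotk_zero (l : List Int) : rotk 0 l = l := by simp [rotk]

theorem rotk_len (l : List Int) : rotk l.length l = l := by simp [rotk]

theorem rotk_length (k : Nat) (l : List Int) (hk : k ≤ l.length) :
    (rotk k l).length = l.length := by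
  simp [rotk]; omega

theorem pvRot1_rotk (l : List Int) (k : Nat) (h1 : 1 ≤ k) (h2 : k ≤ l.length) :
    pvRot1 (rotk k l) = rotk (k - 1) l := by
  have hlen : (rotk k l).length = l.length := rotk_length k l h2
  unfold pvRot1
  rw [hlen]
  have hA : (l.drop k).length = l.length - k := by simp
  have hsplit : l.length - 1 = (l.drop k).length + (k - 1) := by omega
  have hdrop : (rotk k l).drop (l.length - 1) = (l.take k).drop (k - 1) := by
    rw [hsplit]; exact List.drop_length_add_append _
  have htake : (rotk k l).take (l.length - 1) = l.drop k ++ (l.take k).take (k - 1) := by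
    rw [hsplit]; exact List.take_length_add_append _
  rw [hdrop, htake]
  have hk1 : k - 1 < l.length := by omega
  have hgl : (l.take k).drop (k - 1) = [l[k-1]] := by
    have h11 : k - (k - 1) = 1 := by omega
    rw [List.drop_take, h11, List.drop_eq_getElem_cons hk1]
    rfl
  have hgt : (l.take k).take (k - 1) = l.take (k - 1) := by
    rw [List.take_take]; congr 1; omega
  rw [hgl, hgt]
  unfold rotk
  have hk' : k - 1 + 1 = k := by omega
  rw [List.drop_eq_getElem_cons hk1, hk', List.cons_append]
  rfl

theorem pvRot1_iterate (l : List Int) (j : Nat) (hj : j ≤ l.length) :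
    pvRot1^[j] l = rotk (l.length - j) l := by
  induction j with
  | zero => simp [rotk]
  | succ j ih =>
    rw [Function.iterate_succ_apply', ih (by omega),
        pvRot1_rotk l (l.length - j) (by omega) (by omega)]
    have e : l.length - j - 1 = l.length - (j + 1) := by omega
    rw [e]

theorem loop_char (ref : List Int) (m : Nat) (dqr rev : List Int) :
    pvEqRingLoop ref m dqr rev = true ↔
      ∃ j < m, pvRot1^[j+1] dqr = ref ∨ pvRot1^[j+1] rev = ref := by
  induction m generalizing dqr rev with
  | zero => simp [pvEqRingLoop]
  | succ m ih =>
    simp only [pvEqRingLoop]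
    split_ifs with h1 h2
    · simp only [true_iff]
      exact ⟨0, by omega, Or.inl (by simpa using h1)⟩
    · simp only [true_iff]
      exact ⟨0, by omega, Or.inr (by simpa using h2)⟩
    · rw [ih]
      constructor
      · rintro ⟨j, hj, hc⟩
        exact ⟨j + 1, by omega, by
          simpa [Function.iterate_succ_apply] using hc⟩
      · rintro ⟨j, hj, hc⟩
        cases j with
        | zero => simp at hc; tauto
        | succ j =>
          exact ⟨j, by omega, by
            simpa [Function.iterate_succ_apply] using hc⟩

theorem A_char (ring ref : List Int) :
    equivalent_ring ring ref = true ↔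
      ∃ i < ring.length, rotk i ring = ref ∨ rotk i ring.reverse = ref := by
  unfold equivalent_ring
  rw [loop_char]
  constructor
  · rintro ⟨j, hj, hc⟩
    refine ⟨ring.length - (j+1), by omega, ?_⟩
    rw [pvRot1_iterate ring (j+1) (by omega),
        pvRot1_iterate ring.reverse (j+1) (by simpa using by omega : j+1 ≤ ring.reverse.length)] at hc
    simpa using hc
  · rintro ⟨i, hi, hc⟩
    refine ⟨ring.length - 1 - i, by omega, ?_⟩
    rw [pvRot1_iterate ring (ring.length - 1 - i + 1) (by omega),
        pvRot1_iterate ring.reverse (ring.length - 1 - i + 1)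
          (by simp; omega)]
    have : ring.length - (ring.length - 1 - i + 1) = i := by omega
    simp only [List.length_reverse, this]
    exact hc

theorem rotk_reverse (l : List Int) (i : Nat) (hi : i ≤ l.length) :
    rotk i l.reverse = (rotk (l.length - i) l).reverse := by
  unfold rotk
  rw [List.reverse_append, List.reverse_take, List.reverse_drop]
  have h1 : l.length - (l.length - i) = i := by omega
  rw [h1]

theorem rev_bridge (ring ref : List Int) :
    (∃ i < ring.length, rotk i ring.reverse = ref) ↔
      (∃ i < ring.length, rotk i ring = ref.reverse) := by
  constructor
  · rintro ⟨i, hi, hc⟩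
    rw [rotk_reverse ring i (by omega)] at hc
    by_cases h0 : i = 0
    · subst h0
      refine ⟨0, hi, ?_⟩
      rw [Nat.sub_zero, rotk_len] at hc
      rw [rotk_zero, ← hc, List.reverse_reverse]
    · refine ⟨ring.length - i, by omega, ?_⟩
      rw [← hc, List.reverse_reverse]
  · rintro ⟨i, hi, hc⟩
    by_cases h0 : i = 0
    · subst h0
      refine ⟨0, hi, ?_⟩
      rw [rotk_zero] at hc ⊢
      rw [hc, List.reverse_reverse]
    · refine ⟨ring.length - i, by omega, ?_⟩
      rw [rotk_reverse ring (ring.length - i) (by omega)]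
      have : ring.length - (ring.length - i) = i := by omega
      rw [this, hc, List.reverse_reverse]

theorem A_false_of_len (ring ref : List Int) (h : ring.length ≠ ref.length) :
    equivalent_ring ring ref = false := by
  by_contra hc
  rw [Bool.not_eq_false, A_char] at hc
  obtain ⟨i, hi, hc⟩ := hc
  rcases hc with hc | hc
  · have := rotk_length i ring (by omega)
    rw [hc] at this; omega
  · have := rotk_length i ring.reverse (by simp; omega)
    rw [hc] at this; simp at this; omega

-- ---- B-side: the bitap masks ----
theorem testBit_one (j : Nat) : (1 : Nat).testBit j = decide (j = 0) := by
  cases j <;> simp [Nat.testBit_succ]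

theorem masksLoop_testBit (p : List Int) (i : Nat) (m : PySem.Dict Int Nat) (c : Int) (j : Nat) :
    ((pvMasksLoop p i m).getD c 0).testBit j = true ↔
      ((m.getD c 0).testBit j = true ∨ ∃ k < p.length, j = i + k ∧ p[k]? = some c) := by
  induction p generalizing i m with
  | nil => simp [pvMasksLoop]
  | cons x rest ih =>
    rw [pvMasksLoop, ih]
    rw [PySem.Dict.getD_insert]
    constructor
    · rintro (hb | ⟨k, hk, hj, hp⟩)
      · by_cases hcx : c = x
        · subst hcx
          rw [if_pos rfl, Nat.testBit_or, Bool.or_eq_true, Nat.one_shiftLeft,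
              Nat.testBit_two_pow] at hb
        
          rcases hb with hb | hb
          · exact Or.inl hb
          · refine Or.inr ⟨0, by simp, by simpa using (by simpa using hb.symm : i = j).symm, by simp⟩
        · rw [if_neg hcx] at hb
          exact Or.inl hb
      · exact Or.inr ⟨k + 1, by simpa using hk, by omega, by simpa using hp⟩
    · rintro (hb | ⟨k, hk, hj, hp⟩)
      · left
        by_cases hcx : c = x
        · subst hcx
          rw [if_pos rfl, Nat.testBit_or, Bool.or_eq_true]
          exact Or.inl hb
        · rwa [if_neg hcx]
      · cases k with
        | zero =>
          left
          simp only [List.getElem?_cons_zero, Option.some.injEq] at hp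
          subst hp
          rw [if_pos rfl, Nat.testBit_or, Bool.or_eq_true, Nat.one_shiftLeft,
              Nat.testBit_two_pow]
          right
          simp; omega
        | succ k =>
          right
          exact ⟨k, by simpa using hk, by omega, by simpa using hp⟩

theorem masks_testBit (p : List Int) (c : Int) (j : Nat) :
    ((pvMasks p).getD c 0).testBit j = true ↔ p[j]? = some c := by
  unfold pvMasks
  rw [masksLoop_testBit]
  constructor
  · rintro (hb | ⟨k, hk, hj, hp⟩)
    · rw [PySem.Dict.getD_empty] at hb
      simp at hb
    · subst hj
      simpa using hp
  · intro h
    have hj : j < p.length := by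
      by_contra hj
      rw [List.getElem?_eq_none (by omega)] at h
      simp at h
    exact Or.inr ⟨j, hj, by omega, h⟩

-- ---- B-side: the scan invariant ----
-- matchEnd p u j: the first j+1 elements of p equal the last j+1 elements of u
def matchEnd (p u : List Int) (j : Nat) : Prop :=
  j < p.length ∧ j + 1 ≤ u.length ∧ u.drop (u.length - (j+1)) = p.take (j+1)

def bitapInv (p u : List Int) (d : Nat) : Prop :=
  ∀ j, d.testBit j = true ↔ matchEnd p u j

theorem bitapInv_nil (p : List Int) : bitapInv p [] 0 := by
  intro j
  simp [matchEnd]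

theorem bitapInv_step (p u : List Int) (d : Nat) (x : Int) (h : bitapInv p u d) :
    bitapInv p (u ++ [x]) (((d <<< 1) ||| 1) &&& (pvMasks p).getD x 0) := by
  intro j
  rw [matchEnd]
  rw [Nat.testBit_and]
  have hulen : (u ++ [x]).length = u.length + 1 := by simp
  constructor
  · intro hb
    rw [Bool.and_eq_true] at hb
    obtain ⟨hb1, hb2⟩ := hb
    rw [masks_testBit] at hb2
    have hj : j < p.length := by
      by_contra hj
      rw [List.getElem?_eq_none (by omega)] at hb2
      simp at hb2
    have hx : p[j] = x := by
      rw [List.getElem?_eq_getElem hj] at hb2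
      simpa using hb2
    have hlast : p.take (j+1) = p.take j ++ [p[j]] := by
      rw [List.take_add_one, List.getElem?_eq_getElem hj]
      rfl
    rw [Nat.testBit_or, Bool.or_eq_true, Nat.testBit_shiftLeft, testBit_one] at hb1
    cases j with
    | zero =>
      refine ⟨hj, by omega, ?_⟩
      have hd1 : (u ++ [x]).length - (0+1) = u.length := by omega
      rw [hd1, List.drop_left, hlast, hx]
      rfl
    | succ j =>
      have hd : d.testBit j = true := by simpa using hb1
      obtain ⟨hj', hlen', heq'⟩ := (h j).mp hd
      refine ⟨hj, by omega, ?_⟩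
      have hsplit : (u ++ [x]).length - (j + 1 + 1) = u.length - (j + 1) := by omega
      rw [hsplit, List.drop_append_of_le_length (by omega), heq', hlast, hx]
  · rintro ⟨hj, hlen, heq⟩
    have hlast : p.take (j+1) = p.take j ++ [p[j]] := by
      rw [List.take_add_one, List.getElem?_eq_getElem hj]
      rfl
    have hx : p[j] = x := by
      have hsplit : (u ++ [x]).length - (j + 1) = u.length - j := by omega
      rw [hsplit] at heq
      have hgl : ((u ++ [x]).drop (u.length - j)).getLast? = some x := by
        rw [List.drop_append_of_le_length (by omega)]
        simp
      rw [heq, hlast, List.getLast?_concat] at hgl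
      exact Option.some.inj hgl
    rw [Bool.and_eq_true]
    refine ⟨?_, ?_⟩
    · rw [Nat.testBit_or, Bool.or_eq_true, Nat.testBit_shiftLeft, testBit_one]
      cases j with
      | zero => exact Or.inr rfl
      | succ j =>
        left
        have hlen' : j + 1 ≤ u.length := by omega
        have hsplit : (u ++ [x]).length - (j + 1 + 1) = u.length - (j + 1) := by omega
        rw [hsplit, List.drop_append_of_le_length (by omega)] at heq
        have hlast2 : p.take (j+1+1) = p.take (j+1) ++ [p[j+1]] := by
          rw [List.take_add_one, List.getElem?_eq_getElem hj]
          rfl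
        rw [hlast2] at heq
        have hlendrop : (u.drop (u.length - (j+1))).length = j + 1 := by
          rw [List.length_drop]; omega
        have hlentake : (p.take (j+1)).length = j + 1 := by
          rw [List.length_take]; omega
        have hinj := List.append_inj heq (by omega)
        have hd : d.testBit j = true := by
          rw [h j]
          exact ⟨by omega, hlen', hinj.1⟩
        simpa using hd
    · rw [masks_testBit, List.getElem?_eq_getElem hj, hx]

theorem found_check (d n : Nat) :
    (d &&& 1 <<< n ≠ 0) ↔ d.testBit n = true := by
  rw [Nat.one_shiftLeft, Nat.and_two_pow]
  cases h : d.testBit n <;> simp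

theorem bitap_loop (p : List Int) (u : List Int) (d : Nat) (h : bitapInv p u d) (t : List Int) :
    pvBitap (pvMasks p) (1 <<< (p.length - 1)) d t = true ↔
      ∃ k < t.length, matchEnd p (u ++ t.take (k+1)) (p.length - 1) := by
  induction t generalizing u d with
  | nil => simp [pvBitap]
  | cons x rest ih =>
    rw [pvBitap]
    have hstep := bitapInv_step p u d x h
    split_ifs with hf
    · simp only [true_iff]
      refine ⟨0, by simp, ?_⟩
      rw [found_check] at hf
      simpa using (hstep (p.length - 1)).mp hf
    · rw [ih (u ++ [x]) _ hstep]
      constructor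
      · rintro ⟨k, hk, hm⟩
        refine ⟨k + 1, by simpa using hk, ?_⟩
        rw [List.append_assoc] at hm
        simpa using hm
      · rintro ⟨k, hk, hm⟩
        cases k with
        | zero =>
          exfalso
          apply hf
          rw [found_check]
          exact (hstep (p.length - 1)).mpr (by simpa using hm)
        | succ k =>
          refine ⟨k, by simpa using hk, ?_⟩
          rw [List.append_assoc]
          simpa using hm

-- occurrence of p (length n ≥ 1) in t, as the bitap reports it, equals a window equality
theorem bitap_spec (p t : List Int) (hp : p ≠ []) :
    pvBitap (pvMasks p) (1 <<< (p.length - 1)) 0 t = true ↔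
      ∃ i, i + p.length ≤ t.length ∧ (t.drop i).take p.length = p := by
  have hn : 1 ≤ p.length := by
    cases p with
    | nil => exact absurd rfl hp
    | cons a l => simp
  rw [bitap_loop p [] 0 (bitapInv_nil p) t]
  constructor
  · rintro ⟨k, hk, hj, hlen, heq⟩
    simp only [List.nil_append] at hlen heq
    have hk1 : k + 1 ≤ t.length := by omega
    have hlt : (t.take (k+1)).length = k + 1 := by simp; omega
    refine ⟨k + 1 - p.length, by omega, ?_⟩
    have h1 : p.length - 1 + 1 = p.length := by omega
    rw [hlt, h1, List.take_length, List.drop_take] at heq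
    have h2 : k + 1 - (k + 1 - p.length) = p.length := by omega
    rw [h2] at heq
    exact heq
  · rintro ⟨i, hi, heq⟩
    refine ⟨i + p.length - 1, by omega, by omega, ?_, ?_⟩
    · simp only [List.nil_append]
      simp
      omega
    · simp only [List.nil_append]
      have h1 : p.length - 1 + 1 = p.length := by omega
      have hk1 : i + p.length - 1 + 1 = i + p.length := by omega
      rw [h1, hk1]
      have hlt : (t.take (i + p.length)).length = i + p.length := by simp; omega
      rw [hlt]
      have h3 : i + p.length - p.length = i := by omega
      rw [h3, List.drop_take, List.take_length]
      have h2 : i + p.length - i = p.length := by omega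
      rw [h2]
      exact heq

theorem window_eq_rotk (ring : List Int) (i : Nat) (hi : i ≤ ring.length) :
    ((ring ++ ring).drop i).take ring.length = rotk i ring := by
  rw [List.drop_append_of_le_length hi]
  have hlen : (ring.drop i).length = ring.length - i := by simp
  have hsum : ring.length = (ring.drop i).length + i := by omega
  rw [hsum, List.take_length_add_append]
  unfold rotk
  rfl

-- occurrence of a length-n pattern in ring ++ ring = some rotation of ring equals it
theorem occ_iff_rot (ring p : List Int) (hlen : p.length = ring.length) (hne : ring ≠ []) :
    (∃ i, i + p.length ≤ (ring ++ ring).length ∧ ((ring ++ ring).drop i).take p.length = p) ↔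
      ∃ i < ring.length, rotk i ring = p := by
  have hn : 1 ≤ ring.length := by
    cases ring with
    | nil => exact absurd rfl hne
    | cons a l => simp
  rw [hlen]
  constructor
  · rintro ⟨i, hi, heq⟩
    simp only [List.length_append] at hi
    have hile : i ≤ ring.length := by omega
    rw [window_eq_rotk ring i hile] at heq
    by_cases hin : i < ring.length
    · exact ⟨i, hin, heq⟩
    · have : i = ring.length := by omega
      subst this
      rw [rotk_len] at heq
      exact ⟨0, by omega, by rw [rotk_zero]; exact heq⟩
  · rintro ⟨i, hi, heq⟩
    refine ⟨i, by simp; omega, ?_⟩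
    rw [window_eq_rotk ring i (by omega)]
    exact heq

theorem B_char (ring ref : List Int) (hne : ring ≠ [])
    (hlen : ring.length = ref.length) :
    equivalent_ring_alt ring ref = true ↔
      ∃ i < ring.length, rotk i ring = ref ∨ rotk i ring = ref.reverse := by
  unfold equivalent_ring_alt
  simp only []
  rw [if_neg (by omega)]
  rw [if_neg (by
    intro h
    exact hne (List.eq_nil_of_length_eq_zero h))]
  have hrefne : ref ≠ [] := by
    intro h
    subst h
    exact hne (List.eq_nil_of_length_eq_zero (by simpa using hlen))
  have hrevne : ref.reverse ≠ [] := by simpa using hrefne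
  have h1 : ref.length = ring.length := hlen.symm
  have h2 : ref.reverse.length = ring.length := by simpa using hlen.symm
  rw [Bool.or_eq_true]
  have e1 := bitap_spec ref (ring ++ ring) hrefne
  have e2 := bitap_spec ref.reverse (ring ++ ring) hrevne
  rw [h1] at e1
  rw [h2] at e2
  rw [e1, e2]
  have o1 := occ_iff_rot ring ref h1 hne
  have o2 := occ_iff_rot ring ref.reverse h2 hne
  rw [h1] at o1
  rw [h2] at o2
  rw [o1, o2]
  constructor
  · rintro (⟨i, hi, hc⟩ | ⟨i, hi, hc⟩)
    · exact ⟨i, hi, Or.inl hc⟩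
    · exact ⟨i, hi, Or.inr hc⟩
  · rintro ⟨i, hi, hc | hc⟩
    · exact Or.inl ⟨i, hi, hc⟩
    · exact Or.inr ⟨i, hi, hc⟩

-- ===== VERDICT (by name: the statement is the Claim_ definition above) =====
theorem equivalent_ring_spec : Claim_unchanged_equivalent_ring := by
  intro ring ref _ hnd
  by_cases hlen : ring.length = ref.length
  · by_cases hne' : ring = []
    · subst hne'
      exact absurd ⟨rfl, List.eq_nil_of_length_eq_zero (by simpa using hlen.symm)⟩ hnd
    · have hb := B_char ring ref hne' hlen
      have ha := A_char ring ref
      have key : equivalent_ring ring ref = true ↔ equivalent_ring_alt ring ref = true := by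
        rw [ha, hb]
        constructor
        · rintro ⟨i, hi, h | h⟩
          · exact ⟨i, hi, Or.inl h⟩
          · obtain ⟨i', hi', h'⟩ := (rev_bridge ring ref).mp ⟨i, hi, h⟩
            exact ⟨i', hi', Or.inr h'⟩
        · rintro ⟨i, hi, h | h⟩
          · exact ⟨i, hi, Or.inl h⟩
          · obtain ⟨i', hi', h'⟩ := (rev_bridge ring ref).mpr ⟨i, hi, h⟩
            exact ⟨i', hi', Or.inr h'⟩
      cases hA : equivalent_ring ring ref <;> cases hB : equivalent_ring_alt ring ref <;>
        simp_all
  · rw [A_false_of_len ring ref hlen]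
    unfold equivalent_ring_alt
    simp only []
    rw [if_pos (by omega)]

theorem equivalent_ring_changed : Claim_changed_equivalent_ring := by
  unfold Claim_changed_equivalent_ring; decide

theorem equivalent_ring_tight : Claim_exact_equivalent_ring := by
  intro ring ref _ hd
  obtain ⟨h1, h2⟩ := hd
  subst h1; subst h2
  decide
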